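-- pv_equiv track=rewrite | github.com/jordan-gibbs/secret-hitler-bench | secret_hitler/stream.py | _election_tracker
-- ===== SOURCE A (Python) =====
-- YELLOW = "\033[93m"
--
-- DIM = "\033[2m"
--
-- RESET = "\033[0m"
--
-- def _election_tracker(count: int) -> str:
--     pips = ""
--     for i in range(3):
--         if i < count:
--             pips += f"{YELLOW}[!]{RESET}"
--         else:
--             pips += f"{DIM}[ ]{RESET}"
--     return pips
-- ===== SOURCE B (Python) =====
-- YELLOW = "\033[93m"
-- DIM = "\033[2m"
-- RESET = "\033[0m"
--
-- def _election_tracker(count: int) -> str: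
--     n = (0 < count) + (1 < count) + (2 < count)
--     return f"{YELLOW}[!]{RESET}" * n + f"{DIM}[ ]{RESET}" * (3 - n)
-- ===== Notes on version B (the rewrite author's own statement) =====
-- stated objective: simpler
-- what changed: Replaces the loop over range(3) by a closed-form lit-pip count n=(0<count)+(1<count)+(2<count) and two string multiplications.
import Mathlib
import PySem

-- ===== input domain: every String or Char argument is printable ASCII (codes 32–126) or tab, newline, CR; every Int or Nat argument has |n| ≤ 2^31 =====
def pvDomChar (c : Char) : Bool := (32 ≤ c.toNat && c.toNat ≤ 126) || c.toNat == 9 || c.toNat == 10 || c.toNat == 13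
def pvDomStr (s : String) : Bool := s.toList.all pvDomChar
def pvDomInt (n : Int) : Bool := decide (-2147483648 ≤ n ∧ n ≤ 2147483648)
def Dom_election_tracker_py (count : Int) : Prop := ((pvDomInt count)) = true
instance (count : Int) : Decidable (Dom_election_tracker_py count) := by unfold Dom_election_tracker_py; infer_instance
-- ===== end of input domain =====

-- B replaces A's range(3) loop by a closed-form lit-pip count and two string repetitions (objective: simpler).


-- ===== PORT A =====
def pvYellow : String := "\x1b[93m"
def pvDim : String := "\x1b[2m"
def pvReset : String := "\x1b[0m"

-- literal port of A: fold of the range(3) loop over the same string accumulator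
def election_tracker_py (count : Int) : String :=
  (PySem.List.pyRange 0 3 1).foldl
    (fun pips i =>
      if i < count then pips ++ (pvYellow ++ "[!]" ++ pvReset)
      else pips ++ (pvDim ++ "[ ]" ++ pvReset)) ""

-- ===== PORT B =====
-- Python's s * n (empty for n ≤ 0)
def pvStrMul (s : String) (n : Int) : String := String.join (List.replicate n.toNat s)

-- port of B: closed-form pip count, two string multiplications, no loop
def election_tracker_py_alt (count : Int) : String :=
  let n : Int := (if (0:Int) < count then 1 else 0) + (if (1:Int) < count then 1 else 0)
                 + (if (2:Int) < count then 1 else 0)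
  pvStrMul (pvYellow ++ "[!]" ++ pvReset) n ++ pvStrMul (pvDim ++ "[ ]" ++ pvReset) (3 - n)

-- ===== PRECONDITION & SPEC =====
def Spec_election_tracker_py (count : Int) (out : String) : Prop := out = election_tracker_py_alt count
instance (count : Int) (out : String) : Decidable (Spec_election_tracker_py count out) := by unfold Spec_election_tracker_py; infer_instance

-- ===== CLAIM (what is proved, stated in full; the proofs are below) =====
def Claim_equal_election_tracker_py : Prop := ∀ (count : Int), Dom_election_tracker_py count → Spec_election_tracker_py count (election_tracker_py count)

-- ===== LEMMAS AND PROOFS =====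

-- ===== VERDICT (by name: the statement is the Claim_ definition above) =====
theorem election_tracker_py_spec : Claim_equal_election_tracker_py := by
  intro count _
  unfold Spec_election_tracker_py election_tracker_py election_tracker_py_alt
  by_cases h0 : (0:Int) < count <;> by_cases h1 : (1:Int) < count <;>
    by_cases h2 : (2:Int) < count <;>
    first
      | omega
      | simp [PySem.List.pyRange, show List.range 3 = [0,1,2] from rfl, List.map, List.foldl,
            h0, h1, h2, pvStrMul, String.join, String.append_assoc]
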